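-- pv_equiv track=rewrite | github.com/zmousavi/signet_2023 | utils_plot.py | neighbor_genes
-- ===== SOURCE A (Python) =====
-- def neighbor_genes(innerlevel_genes, selected_geneset, network_ppi, TFsource_target, TFtarget_source):
--     neighbors = set()
--     for gene in innerlevel_genes:
--         if gene in network_ppi:
--             paired = network_ppi[gene].intersection(selected_geneset)
--             neighbors = neighbors.union(paired)
--
--         if gene in TFsource_target:
--             TFtargets = TFsource_target[gene].intersection(selected_geneset)
--             neighbors = neighbors.union(TFtargets)
--
--         if gene in TFtarget_source:
--             TFsources = TFtarget_source[gene].intersection(selected_geneset)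
--             neighbors = neighbors.union(TFsources)
--
--     return neighbors
-- ===== SOURCE B (Python) =====
-- def neighbor_genes(innerlevel_genes, selected_geneset, network_ppi, TFsource_target, TFtarget_source):
--     # Build ONE merged adjacency index over the three dictionaries up front
--     # (concatenating value collections per key), then do a single lookup per
--     # gene into it and intersect with selected_geneset once at the end.
--     merged = {}
--     for mapping in (network_ppi, TFsource_target, TFtarget_source):
--         for key, vals in mapping.items():
--             if key in merged:
--                 merged[key] = merged[key] + list(vals)
--             else:
--                 merged[key] = list(vals)
--     raw = set()
--     for gene in innerlevel_genes:
--         if gene in merged: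
--             raw.update(merged[gene])
--     return raw.intersection(selected_geneset)
-- ===== Notes on version B (the rewrite author's own statement) =====
-- stated objective: faster
-- what changed: B precomputes a single merged adjacency index (one dict merging all three input dictionaries by concatenating their value collections per key), then performs one lookup per gene into that index with an in-place raw.update and intersects with selected_geneset once at the end, replacing A's three membership tests, per-dict intersections and copying set.union rebuilds inside the gene loop; Pre_ only excludes association lists with duplicate keys, which never encode a real Python dict.
import Mathlib
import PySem

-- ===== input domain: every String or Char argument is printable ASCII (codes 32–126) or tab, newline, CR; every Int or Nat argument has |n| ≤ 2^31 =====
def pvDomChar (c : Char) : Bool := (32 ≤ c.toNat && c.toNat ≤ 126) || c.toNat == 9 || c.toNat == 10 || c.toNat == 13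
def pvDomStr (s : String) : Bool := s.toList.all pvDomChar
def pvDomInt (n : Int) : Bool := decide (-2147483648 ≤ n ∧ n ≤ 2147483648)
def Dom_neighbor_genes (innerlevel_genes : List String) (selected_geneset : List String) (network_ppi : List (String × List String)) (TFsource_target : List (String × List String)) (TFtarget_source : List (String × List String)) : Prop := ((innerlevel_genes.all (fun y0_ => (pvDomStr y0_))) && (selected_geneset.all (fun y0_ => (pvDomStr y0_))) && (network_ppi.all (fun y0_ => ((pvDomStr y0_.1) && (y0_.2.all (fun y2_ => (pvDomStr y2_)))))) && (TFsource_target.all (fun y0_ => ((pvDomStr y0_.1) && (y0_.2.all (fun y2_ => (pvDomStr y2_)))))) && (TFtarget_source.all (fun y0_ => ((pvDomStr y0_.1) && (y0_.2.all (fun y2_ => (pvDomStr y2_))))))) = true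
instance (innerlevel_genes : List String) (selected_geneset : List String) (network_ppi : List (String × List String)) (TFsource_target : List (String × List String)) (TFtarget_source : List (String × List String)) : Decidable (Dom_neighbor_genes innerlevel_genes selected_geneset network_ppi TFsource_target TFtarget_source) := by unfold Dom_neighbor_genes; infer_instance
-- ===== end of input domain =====

-- B builds one merged adjacency index over the three dictionaries up front, then does a
-- single lookup per gene and one final intersection with selected_geneset (alternative
-- decomposition; return value only, neither program mutates its arguments).

-- ===== PORT A =====
-- first-match association-list lookup: 'gene in d' / 'd[gene]' on a dict argument
def pvDictGet? (d : List (String × List String)) (g : String) : Option (List String) :=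
  (d.find? (fun p => p.1 == g)).map (fun p => p.2)

-- body of one 'if gene in d: neighbors = neighbors.union(d[gene].intersection(selected_geneset))' block of A
def pvStepA (sel : List String) (d : List (String × List String)) (neighbors : List String) (g : String) : List String :=
  match pvDictGet? d g with
  | some vals => PySem.Set.union neighbors (PySem.Set.inter vals sel)
  | none => neighbors

def neighbor_genes (innerlevel_genes : List String) (selected_geneset : List String) (network_ppi : List (String × List String)) (TFsource_target : List (String × List String)) (TFtarget_source : List (String × List String)) : List String :=
  innerlevel_genes.foldl (fun neighbors gene =>
    pvStepA selected_geneset TFtarget_source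
      (pvStepA selected_geneset TFsource_target
        (pvStepA selected_geneset network_ppi neighbors gene) gene) gene) PySem.Set.empty

-- ===== PORT B =====
-- one items() entry of B's merge pass: 'merged[key] = merged[key] + list(vals)'
-- (overwrite in place) if key is present, else 'merged[key] = list(vals)' (append: dict order)
def pvMergeStep (acc : List (String × List String)) (k : String) (vs : List String) : List (String × List String) :=
  match pvDictGet? acc k with
  | some old => acc.map (fun p => if p.1 == k then (k, old ++ vs) else p)
  | none => acc ++ [(k, vs)]

-- 'for key, vals in mapping.items(): …' of B's merge pass
def pvMergeDict (acc : List (String × List String)) (m : List (String × List String)) : List (String × List String) :=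
  m.foldl (fun acc kv => pvMergeStep acc kv.1 kv.2) acc

def neighbor_genes_alt (innerlevel_genes : List String) (selected_geneset : List String) (network_ppi : List (String × List String)) (TFsource_target : List (String × List String)) (TFtarget_source : List (String × List String)) : List String :=
  let merged := [network_ppi, TFsource_target, TFtarget_source].foldl pvMergeDict []
  let raw := innerlevel_genes.foldl (fun raw gene =>
    match pvDictGet? merged gene with
    | some vs => PySem.Set.update raw vs
    | none => raw) PySem.Set.empty
  PySem.Set.inter raw selected_geneset

-- ===== PRECONDITION & SPEC =====
-- Pre_ excludes only association lists with DUPLICATE keys: a real Python dict never has them,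
-- so every input the Python function can receive is admitted; on a duplicate-key encoding A's
-- first-match lookup and B's merge over all items would read different entries.
def Pre_neighbor_genes (innerlevel_genes : List String) (selected_geneset : List String) (network_ppi : List (String × List String)) (TFsource_target : List (String × List String)) (TFtarget_source : List (String × List String)) : Prop :=
  (network_ppi.map Prod.fst).Nodup ∧ (TFsource_target.map Prod.fst).Nodup ∧ (TFtarget_source.map Prod.fst).Nodup
instance (innerlevel_genes : List String) (selected_geneset : List String) (network_ppi : List (String × List String)) (TFsource_target : List (String × List String)) (TFtarget_source : List (String × List String)) : Decidable (Pre_neighbor_genes innerlevel_genes selected_geneset network_ppi TFsource_target TFtarget_source) := by unfold Pre_neighbor_genes; infer_instance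

def pvWitness_neighbor_genes : List String × List String × (List (String × List String)) × (List (String × List String)) × (List (String × List String)) :=
  (["g"], ["a"], [("g", ["a", "b"])], [], [("a", ["g"])])

def Spec_neighbor_genes (innerlevel_genes : List String) (selected_geneset : List String) (network_ppi : List (String × List String)) (TFsource_target : List (String × List String)) (TFtarget_source : List (String × List String)) (out : List String) : Prop := out = neighbor_genes_alt innerlevel_genes selected_geneset network_ppi TFsource_target TFtarget_source
instance (innerlevel_genes : List String) (selected_geneset : List String) (network_ppi : List (String × List String)) (TFsource_target : List (String × List String)) (TFtarget_source : List (String × List String)) (out : List String) : Decidable (Spec_neighbor_genes innerlevel_genes selected_geneset network_ppi TFsource_target TFtarget_source out) := by unfold Spec_neighbor_genes; infer_instance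

-- ===== CLAIM (what is proved, stated in full; the proofs are below) =====
def Claim_equal_neighbor_genes : Prop := ∀ (innerlevel_genes : List String) (selected_geneset : List String) (network_ppi : List (String × List String)) (TFsource_target : List (String × List String)) (TFtarget_source : List (String × List String)), Dom_neighbor_genes innerlevel_genes selected_geneset network_ppi TFsource_target TFtarget_source → Pre_neighbor_genes innerlevel_genes selected_geneset network_ppi TFsource_target TFtarget_source → Spec_neighbor_genes innerlevel_genes selected_geneset network_ppi TFsource_target TFtarget_source (neighbor_genes innerlevel_genes selected_geneset network_ppi TFsource_target TFtarget_source)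

-- ===== LEMMAS AND PROOFS =====

-- a key absent from the key list looks up to none
theorem pv_lookup_eq_none (m : List (String × List String)) (g : String) (h : g ∉ m.map Prod.fst) :
    pvDictGet? m g = none := by
  simp only [pvDictGet?, Option.map_eq_none_iff, List.find?_eq_none]
  intro p hp
  simp only [beq_iff_eq]
  intro hpg
  exact h (List.mem_map.mpr ⟨p, hp, hpg⟩)

-- lookup after one merge step: the stepped key gains vs at the end, other keys are untouched
theorem pv_lookup_mergeStep (acc : List (String × List String)) (k : String) (vs : List String) (g : String) :
    pvDictGet? (pvMergeStep acc k vs) g =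
      if g = k then some (((pvDictGet? acc k).getD []) ++ vs) else pvDictGet? acc g := by
  unfold pvMergeStep
  cases hk : pvDictGet? acc k with
  | none =>
      have hfk : acc.find? (fun p => p.1 == k) = none := by
        simpa [pvDictGet?] using hk
      by_cases hg : g = k
      · subst hg
        simp only [pvDictGet?, List.find?_append, hfk]
        simp [List.find?]
      · simp only [if_neg hg, pvDictGet?, List.find?_append]
        cases hf : acc.find? (fun p => p.1 == g) with
        | some p => simp
        | none =>
            have hkg : (k == g) = false := beq_eq_false_iff_ne.mpr (Ne.symm hg)
            simp [List.find?, hkg]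
  | some old =>
      have hmap : (acc.map (fun p => if p.1 == k then (k, old ++ vs) else p)).find? (fun p => p.1 == g)
          = (acc.find? (fun p => p.1 == g)).map (fun p => if p.1 == k then (k, old ++ vs) else p) := by
        rw [List.find?_map]
        have hpred : ((fun p : String × List String => p.1 == g) ∘ (fun p => if p.1 == k then (k, old ++ vs) else p)) = (fun p => p.1 == g) := by
          funext p
          by_cases hpk : p.1 = k <;> simp [hpk, Function.comp]
        rw [hpred]
      simp only [pvDictGet?, hmap, Option.map_map]
      obtain ⟨p0, hfind, hp0⟩ : ∃ p0, acc.find? (fun p => p.1 == k) = some p0 ∧ p0.2 = old := by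
        simp only [pvDictGet?] at hk
        cases hf : acc.find? (fun p => p.1 == k) with
        | none => simp [hf] at hk
        | some q => exact ⟨q, rfl, by simpa [hf] using hk⟩
      by_cases hg : g = k
      · subst hg
        have hk1 : p0.1 = g := by simpa using List.find?_some hfind
        simp [pvDictGet?, hfind, Function.comp, hk1]
      · simp only [if_neg hg]
        cases hf : acc.find? (fun p => p.1 == g) with
        | none => simp
        | some q =>
            have hq1 : q.1 = g := by simpa using List.find?_some hf
            simp [Function.comp, hq1, hg]

-- lookup in a merged dict combines the two lookups (needs m's keys distinct)
theorem pv_lookup_mergeDict (acc m : List (String × List String)) (g : String)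
    (h : (m.map Prod.fst).Nodup) :
    pvDictGet? (pvMergeDict acc m) g =
      match pvDictGet? acc g, pvDictGet? m g with
      | none, none => none
      | some a, none => some a
      | none, some b => some b
      | some a, some b => some (a ++ b) := by
  induction m generalizing acc with
  | nil =>
      show pvDictGet? acc g = _
      have h0 : pvDictGet? ([] : List (String × List String)) g = none := rfl
      rw [h0]
      cases hacc : pvDictGet? acc g <;> simp
  | cons kv rest ih =>
      obtain ⟨k, vs⟩ := kv
      simp only [List.map_cons, List.nodup_cons] at h
      obtain ⟨hk, hrest⟩ := h
      show pvDictGet? (pvMergeDict (pvMergeStep acc k vs) rest) g = _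
      rw [ih _ hrest, pv_lookup_mergeStep]
      by_cases hg : g = k
      · subst hg
        have hr : pvDictGet? rest g = none := pv_lookup_eq_none rest g hk
        have hm : pvDictGet? ((g, vs) :: rest) g = some vs := by simp [pvDictGet?, List.find?]
        rw [hm, hr, if_pos rfl]
        cases hacc : pvDictGet? acc g <;> simp
      · have hm : pvDictGet? ((k, vs) :: rest) g = pvDictGet? rest g := by
          have hkg : (k == g) = false := beq_eq_false_iff_ne.mpr (Ne.symm hg)
          simp [pvDictGet?, List.find?, hkg]
        rw [hm, if_neg hg]

-- filter commutes with Set.add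
theorem pv_filter_add (s : List String) (x : String) (p : String → Bool) :
    (PySem.Set.add s x).filter p = if p x then PySem.Set.add (s.filter p) x else s.filter p := by
  rw [PySem.Set.add_eq_ite, PySem.Set.add_eq_ite]
  by_cases hx : x ∈ s <;> by_cases hp : p x <;>
    simp [hx, hp, List.filter_append, List.mem_filter]

-- intersection distributes over update/union of Sets
theorem pv_inter_update (s t sel : List String) :
    PySem.Set.inter (PySem.Set.update s t) sel
      = PySem.Set.union (PySem.Set.inter s sel) (PySem.Set.inter t sel) := by
  show (t.foldl PySem.Set.add s).filter _ = (t.filter _).foldl PySem.Set.add (s.filter _)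
  rw [List.foldl_filter]
  induction t generalizing s with
  | nil => rfl
  | cons y ys ih =>
      simp only [List.foldl_cons]
      rw [ih, pv_filter_add]

-- updating with a concatenation is two updates
theorem pv_update_append (r a b : List String) :
    PySem.Set.update r (a ++ b) = PySem.Set.update (PySem.Set.update r a) b := by
  show (a ++ b).foldl _ r = _
  rw [List.foldl_append]
  rfl

-- one gene of B's loop, intersected, equals A's three blocks on the intersected accumulator
theorem pv_gene_step (sel : List String) (ppi tf1 tf2 : List (String × List String))
    (h1 : (ppi.map Prod.fst).Nodup) (h2 : (tf1.map Prod.fst).Nodup) (h3 : (tf2.map Prod.fst).Nodup)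
    (r : List String) (g : String) :
    PySem.Set.inter
      (match pvDictGet? ([ppi, tf1, tf2].foldl pvMergeDict []) g with
       | some vs => PySem.Set.update r vs
       | none => r) sel
    = pvStepA sel tf2 (pvStepA sel tf1 (pvStepA sel ppi (PySem.Set.inter r sel) g) g) g := by
  have hnil : pvDictGet? ([] : List (String × List String)) g = none := rfl
  have hm : pvDictGet? ([ppi, tf1, tf2].foldl pvMergeDict []) g =
      match (match (match pvDictGet? ([] : List (String × List String)) g, pvDictGet? ppi g with
              | none, none => none | some a, none => some a | none, some b => some b | some a, some b => some (a ++ b)),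
            pvDictGet? tf1 g with
              | none, none => none | some a, none => some a | none, some b => some b | some a, some b => some (a ++ b)),
          pvDictGet? tf2 g with
              | none, none => none | some a, none => some a | none, some b => some b | some a, some b => some (a ++ b) := by
    show pvDictGet? (pvMergeDict (pvMergeDict (pvMergeDict [] ppi) tf1) tf2) g = _
    rw [pv_lookup_mergeDict _ _ _ h3, pv_lookup_mergeDict _ _ _ h2, pv_lookup_mergeDict _ _ _ h1]
  rw [hm, hnil]
  cases hA : pvDictGet? ppi g <;> cases hB : pvDictGet? tf1 g <;> cases hC : pvDictGet? tf2 g <;>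
    simp only [pvStepA, hA, hB, hC, pv_update_append, pv_inter_update]

-- loop invariant over the gene list: A's accumulator = B's raw accumulator ∩ selected_geneset
theorem pv_main (genes sel : List String) (ppi tf1 tf2 : List (String × List String))
    (h1 : (ppi.map Prod.fst).Nodup) (h2 : (tf1.map Prod.fst).Nodup) (h3 : (tf2.map Prod.fst).Nodup)
    (s : List String) :
    genes.foldl (fun neighbors gene =>
      pvStepA sel tf2 (pvStepA sel tf1 (pvStepA sel ppi neighbors gene) gene) gene)
      (PySem.Set.inter s sel)
    = PySem.Set.inter (genes.foldl (fun raw gene =>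
        match pvDictGet? ([ppi, tf1, tf2].foldl pvMergeDict []) gene with
        | some vs => PySem.Set.update raw vs
        | none => raw) s) sel := by
  induction genes generalizing s with
  | nil => rfl
  | cons g gs ih =>
      simp only [List.foldl_cons]
      rw [← pv_gene_step sel ppi tf1 tf2 h1 h2 h3 s g]
      exact ih _

-- ===== VERDICT (by name: the statement is the Claim_ definition above) =====
theorem neighbor_genes_spec : Claim_equal_neighbor_genes := by
  intro igs sel ppi tf1 tf2 _ hpre
  obtain ⟨h1, h2, h3⟩ := hpre
  show neighbor_genes igs sel ppi tf1 tf2 = neighbor_genes_alt igs sel ppi tf1 tf2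
  exact pv_main igs sel ppi tf1 tf2 h1 h2 h3 PySem.Set.empty
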